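-- pv_equiv track=rewrite | github.com/ahmednasr999/openclaw-workspace | scripts/linkedin-auto-poster.py | to_unicode_bold
-- ===== SOURCE A (Python) =====
-- def to_unicode_bold(text):
--     """Convert regular text to Unicode Mathematical Bold (LinkedIn-compatible)."""
--     result = []
--     for ch in text:
--         if 'A' <= ch <= 'Z':
--             result.append(chr(0x1D5D4 + ord(ch) - ord('A')))
--         elif 'a' <= ch <= 'z':
--             result.append(chr(0x1D5EE + ord(ch) - ord('a')))
--         elif '0' <= ch <= '9':
--             result.append(chr(0x1D7EC + ord(ch) - ord('0')))
--         else: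
--             result.append(ch)
--     return ''.join(result)
-- ===== SOURCE B (Python) =====
-- def to_unicode_bold(text):
--     """Convert regular text to Unicode Mathematical Bold (LinkedIn-compatible)."""
--     # Three staged whole-string passes, one per character class; each pass
--     # shifts one contiguous ASCII range by a fixed delta.  Correct because the
--     # bold code points are far above ASCII, so later passes never touch
--     # characters converted by an earlier pass.
--     for lo, hi, delta in ((65, 90, 0x1D5D4 - 65),
--                           (97, 122, 0x1D5EE - 97),
--                           (48, 57, 0x1D7EC - 48)):
--         text = ''.join(chr(ord(c) + delta) if lo <= ord(c) <= hi else c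
--                        for c in text)
--     return text
-- ===== Notes on version B (the rewrite author's own statement) =====
-- stated objective: alternative
-- what changed: Replaces the single per-character if/elif branch-and-append loop with three staged whole-string passes, each shifting one contiguous ASCII range (uppercase, lowercase, digits) by a fixed delta, relying on bold code points lying outside ASCII so later passes leave already-converted characters unchanged.
import Mathlib
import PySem

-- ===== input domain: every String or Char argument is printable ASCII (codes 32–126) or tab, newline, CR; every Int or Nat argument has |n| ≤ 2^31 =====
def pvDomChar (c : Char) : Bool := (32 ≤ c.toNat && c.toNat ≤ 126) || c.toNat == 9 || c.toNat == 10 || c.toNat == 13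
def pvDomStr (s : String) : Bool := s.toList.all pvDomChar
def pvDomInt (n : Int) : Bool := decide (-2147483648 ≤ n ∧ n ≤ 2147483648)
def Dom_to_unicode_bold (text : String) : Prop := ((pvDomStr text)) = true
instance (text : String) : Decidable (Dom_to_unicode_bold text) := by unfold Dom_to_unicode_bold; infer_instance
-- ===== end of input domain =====

set_option maxRecDepth 8192


-- B replaces A's single per-character if/elif loop with three staged whole-string
-- passes, one per character class, each shifting one contiguous ASCII range by a
-- fixed delta; objective: alternative.

-- ===== PORT A =====
def to_unicode_bold (text : String) : String :=
  let result := text.toList.foldl (fun acc ch =>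
    if 'A' ≤ ch ∧ ch ≤ 'Z' then acc ++ [Char.ofNat (0x1D5D4 + ch.toNat - 'A'.toNat)]
    else if 'a' ≤ ch ∧ ch ≤ 'z' then acc ++ [Char.ofNat (0x1D5EE + ch.toNat - 'a'.toNat)]
    else if '0' ≤ ch ∧ ch ≤ '9' then acc ++ [Char.ofNat (0x1D7EC + ch.toNat - '0'.toNat)]
    else acc ++ [ch]) []
  String.ofList result

-- ===== PORT B =====
-- for lo, hi, delta in ((65,90,0x1D5D4-65),(97,122,0x1D5EE-97),(48,57,0x1D7EC-48)):
--   text = ''.join(chr(ord(c)+delta) if lo <= ord(c) <= hi else c for c in text)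
def to_unicode_bold_alt (text : String) : String :=
  ([(65, 90, 0x1D5D4 - 65), (97, 122, 0x1D5EE - 97), (48, 57, 0x1D7EC - 48)] :
      List (Nat × Nat × Nat)).foldl
    (fun s t =>
      String.ofList (s.toList.map (fun c =>
        if t.1 ≤ c.toNat ∧ c.toNat ≤ t.2.1 then Char.ofNat (c.toNat + t.2.2) else c)))
    text

-- ===== PRECONDITION & SPEC =====
def Spec_to_unicode_bold (text : String) (out : String) : Prop := out = to_unicode_bold_alt text
instance (text : String) (out : String) : Decidable (Spec_to_unicode_bold text out) := by unfold Spec_to_unicode_bold; infer_instance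

-- ===== CLAIM =====
def Claim_equal_to_unicode_bold : Prop := ∀ (text : String), Dom_to_unicode_bold text → Spec_to_unicode_bold text (to_unicode_bold text)

-- ===== LEMMAS AND PROOFS =====

-- A's per-character step, and B's three passes composed into one per-character function
def pvStepA (ch : Char) : Char :=
  if 'A' ≤ ch ∧ ch ≤ 'Z' then Char.ofNat (0x1D5D4 + ch.toNat - 'A'.toNat)
  else if 'a' ≤ ch ∧ ch ≤ 'z' then Char.ofNat (0x1D5EE + ch.toNat - 'a'.toNat)
  else if '0' ≤ ch ∧ ch ≤ '9' then Char.ofNat (0x1D7EC + ch.toNat - '0'.toNat)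
  else ch

def pvPass (lo hi delta : Nat) (c : Char) : Char :=
  if lo ≤ c.toNat ∧ c.toNat ≤ hi then Char.ofNat (c.toNat + delta) else c

def pvStepB (c : Char) : Char :=
  pvPass 48 57 (0x1D7EC - 48) (pvPass 97 122 (0x1D5EE - 97) (pvPass 65 90 (0x1D5D4 - 65) c))

theorem pvStep_eq_ascii : ∀ n ∈ List.range 128, pvStepA (Char.ofNat n) = pvStepB (Char.ofNat n) := by
  decide

theorem pvStep_eq (c : Char) (h : pvDomChar c = true) : pvStepA c = pvStepB c := by
  have hlt : c.toNat < 128 := by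
    simp [pvDomChar] at h
    omega
  have := pvStep_eq_ascii c.toNat (List.mem_range.mpr hlt)
  simpa [Char.ofNat_toNat] using this

theorem pvFoldA (l : List Char) (acc : List Char) :
    l.foldl (fun acc ch =>
      if 'A' ≤ ch ∧ ch ≤ 'Z' then acc ++ [Char.ofNat (0x1D5D4 + ch.toNat - 'A'.toNat)]
      else if 'a' ≤ ch ∧ ch ≤ 'z' then acc ++ [Char.ofNat (0x1D5EE + ch.toNat - 'a'.toNat)]
      else if '0' ≤ ch ∧ ch ≤ '9' then acc ++ [Char.ofNat (0x1D7EC + ch.toNat - '0'.toNat)]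
      else acc ++ [ch]) acc = acc ++ l.map pvStepA := by
  induction l generalizing acc with
  | nil => simp
  | cons c t ih =>
      simp only [List.foldl_cons, List.map_cons, ih]
      by_cases h1 : 'A' ≤ c ∧ c ≤ 'Z'
      · simp [pvStepA, h1]
      · by_cases h2 : 'a' ≤ c ∧ c ≤ 'z'
        · simp [pvStepA, h1, h2]
        · by_cases h3 : '0' ≤ c ∧ c ≤ '9'
          · simp [pvStepA, h1, h2, h3]
          · simp [pvStepA, h1, h2, h3]

theorem pvAltEq (text : String) :
    to_unicode_bold_alt text = String.ofList (text.toList.map pvStepB) := by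
  unfold to_unicode_bold_alt
  simp only [List.foldl_cons, List.foldl_nil, String.toList_ofList, List.map_map]
  rfl

-- ===== VERDICT =====
theorem to_unicode_bold_spec : Claim_equal_to_unicode_bold := by
  intro text hdom
  unfold Spec_to_unicode_bold
  rw [pvAltEq]
  unfold to_unicode_bold
  simp only [pvFoldA, List.nil_append]
  congr 1
  apply List.map_congr_left
  intro c hc
  have hd : pvDomChar c = true := by
    unfold Dom_to_unicode_bold pvDomStr at hdom
    exact List.all_eq_true.mp hdom c hc
  exact pvStep_eq c hd
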